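-- pv_equiv track=rewrite | github.com/tomfletch/AdventOfCode2015 | 19/day_19_1.py | apply_rule_options
-- ===== SOURCE A (Python) =====
-- from typing import List, Set, Tuple
--
-- def apply_rule_options(from_molecule: str, to_molecule: str, molecule: str):
--     new_molecules: Set[str] = set()
--
--     start = molecule.find(from_molecule)
--
--     while start != -1:
--         before = molecule[0:start]
--         after = molecule[start+len(from_molecule):]
--         new_molecule = before + to_molecule + after
--         new_molecules.add(new_molecule)
--         start = molecule.find(from_molecule, start+1)
--
--     return new_molecules
-- ===== SOURCE B (Python) =====
-- def apply_rule_options(from_molecule: str, to_molecule: str, molecule: str):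
--     # Rabin-Karp: slide a rolling polynomial hash (mod a prime) over the molecule,
--     # verify the window exactly on each hash hit, and splice in the replacement there.
--     result = set()
--     m = len(from_molecule)
--     n = len(molecule)
--     if m > n:
--         return result
--     base = 131
--     mod = 1000000007
--     target = 0
--     for c in from_molecule:
--         target = (target * base + ord(c)) % mod
--     h = 0
--     for c in molecule[:m]:
--         h = (h * base + ord(c)) % mod
--     power = pow(base, m, mod)
--     for i in range(n - m + 1):
--         if h == target and molecule[i:i+m] == from_molecule:
--             result.add(molecule[:i] + to_molecule + molecule[i+m:])
--         if i + m < n: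
--             h = (h * base - ord(molecule[i]) * power + ord(molecule[i + m])) % mod
--     return result
-- ===== Notes on version B (the rewrite author's own statement) =====
-- stated objective: alternative
-- what changed: B replaces A's repeated str.find jumping between occurrences by a Rabin-Karp scan: a rolling polynomial hash mod 1000000007 of a sliding window is compared against the pattern's hash, and the substitution is spliced in only after an exact window verification on a hash hit.
import Mathlib
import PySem

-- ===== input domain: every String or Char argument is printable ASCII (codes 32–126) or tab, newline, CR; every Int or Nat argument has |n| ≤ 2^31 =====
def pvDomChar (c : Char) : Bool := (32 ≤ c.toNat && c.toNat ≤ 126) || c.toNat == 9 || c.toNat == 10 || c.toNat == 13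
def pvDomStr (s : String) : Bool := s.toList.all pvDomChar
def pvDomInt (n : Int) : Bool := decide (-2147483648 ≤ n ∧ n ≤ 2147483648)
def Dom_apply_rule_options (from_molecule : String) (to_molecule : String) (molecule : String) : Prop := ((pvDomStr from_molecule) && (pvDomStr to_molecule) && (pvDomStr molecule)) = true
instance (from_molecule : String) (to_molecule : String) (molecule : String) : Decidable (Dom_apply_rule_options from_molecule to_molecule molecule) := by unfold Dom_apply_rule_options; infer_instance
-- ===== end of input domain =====

-- B replaces A's find/next-find jumping loop by Rabin–Karp: a rolling polynomial hash (mod a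
-- prime) over a sliding window, with exact verification on each hash hit; objective: alternative.

-- ===== PORT A =====
-- A's while-loop: start walks through occurrence positions via str.find(sub, start+1).
-- Fuel only makes the recursion total: start strictly increases and stays ≤ len(molecule),
-- so len(molecule)+2 steps always suffice; the computation is exactly A's loop.
def pvAGo (sub to_m s : List Char) (fuel : Nat) (start : Int) (acc : PySem.Set (List Char)) : PySem.Set (List Char) :=
  match fuel with
  | 0 => acc
  | fuel + 1 =>
    if start = -1 then acc
    else
      let before := PySem.List.slice s (some 0) (some start)
      let after := PySem.List.slice s (some (start + (sub.length : Int))) none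
      let new_molecule := before ++ to_m ++ after
      pvAGo sub to_m s fuel (PySem.Chars.findFrom s sub (start + 1) none) (PySem.Set.add acc new_molecule)

def apply_rule_options (from_molecule : String) (to_molecule : String) (molecule : String) : List String :=
  (pvAGo from_molecule.toList to_molecule.toList molecule.toList (molecule.toList.length + 2)
    (PySem.Chars.find molecule.toList from_molecule.toList) []).map String.ofList

-- ===== PORT B =====
-- B's polynomial hash mod 1000000007: for c in l: h = (h*131 + ord(c)) % 1000000007
def pvBPhash (l : List Char) : Int :=
  l.foldl (fun a c => PySem.Int.mod (a * 131 + (c.toNat : Int)) 1000000007) 0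

-- one iteration of B's main loop: state (h, result); the rolling update fires only while i+m < n
def pvBStep (sub to_m s : List Char) (target pow : Int)
    (st : Int × PySem.Set (List Char)) (i : Int) : Int × PySem.Set (List Char) :=
  let acc' := if st.1 = target ∧ PySem.List.slice s (some i) (some (i + (sub.length : Int))) = sub
    then PySem.Set.add st.2
      (PySem.List.slice s none (some i) ++ to_m ++ PySem.List.slice s (some (i + (sub.length : Int))) none)
    else st.2
  let h' := if i + (sub.length : Int) < (s.length : Int)
    then PySem.Int.mod (st.1 * 131 - ((PySem.List.pyGetD s i ' ').toNat : Int) * pow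
          + ((PySem.List.pyGetD s (i + (sub.length : Int)) ' ').toNat : Int)) 1000000007
    else st.1
  (h', acc')

def apply_rule_options_alt (from_molecule : String) (to_molecule : String) (molecule : String) : List String :=
  let sub := from_molecule.toList
  let s := molecule.toList
  if sub.length > s.length then []
  else
    ((PySem.List.pyRange 0 ((s.length : Int) - (sub.length : Int) + 1) 1).foldl
        (pvBStep sub to_molecule.toList s (pvBPhash sub) (PySem.Int.powMod 131 sub.length 1000000007))
        (pvBPhash (PySem.List.slice s none (some (sub.length : Int))), [])).2.map String.ofList

-- ===== PRECONDITION & SPEC =====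
def Spec_apply_rule_options (from_molecule : String) (to_molecule : String) (molecule : String) (out : List String) : Prop := out = apply_rule_options_alt from_molecule to_molecule molecule
instance (from_molecule : String) (to_molecule : String) (molecule : String) (out : List String) : Decidable (Spec_apply_rule_options from_molecule to_molecule molecule out) := by unfold Spec_apply_rule_options; infer_instance

-- ===== CLAIM (what is proved, stated in full; the proofs are below) =====
def Claim_equal_apply_rule_options : Prop := ∀ (from_molecule : String) (to_molecule : String) (molecule : String), Dom_apply_rule_options from_molecule to_molecule molecule → Spec_apply_rule_options from_molecule to_molecule molecule (apply_rule_options from_molecule to_molecule molecule)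

-- ===== LEMMAS AND PROOFS =====

-- Both loops accumulate, at each matching position i, the same substitution:
def pvStep (sub to_m s : List Char) (acc : PySem.Set (List Char)) (i : Nat) : PySem.Set (List Char) :=
  if sub <+: s.drop i
  then PySem.Set.add acc (s.take i ++ to_m ++ s.drop (i + sub.length))
  else acc

lemma pvStep_skip (sub to_m s : List Char) :
    ∀ (l : List Nat) (acc : PySem.Set (List Char)), (∀ i ∈ l, ¬ sub <+: s.drop i) →
      l.foldl (pvStep sub to_m s) acc = acc := by
  intro l
  induction l with
  | nil => intro acc _; rfl
  | cons a l ih =>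
    intro acc h
    have ha := h a (List.mem_cons_self ..)
    simp only [List.foldl_cons, pvStep]
    rw [if_neg ha]
    exact ih _ (fun i hi => h i (List.mem_cons_of_mem _ hi))

lemma pvPrefix_ge (sub s : List Char) (k i : Nat) (hk : k ≤ i) (h : sub <+: s.drop i) :
    sub <:+: s.drop k := by
  rw [← PySem.Chars.isIn_iff_infix, ← PySem.Chars.exists_prefix_drop_iff_isIn]
  refine ⟨i - k, ?_⟩
  have hik : k + (i - k) = i := by omega
  rwa [List.drop_drop, hik]

lemma pvFindFrom_past (s sub : List Char) :
    PySem.Chars.findFrom s sub ((s.length : Int) + 1) none = -1 := by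
  simp only [PySem.Chars.findFrom]
  rw [if_pos]
  · rw [if_neg (show ¬((s.length : Int) + 1 < 0) by omega)]
    omega

lemma pvAGo_eq (sub to_m s : List Char) :
    ∀ (fuel k : Nat) (acc : PySem.Set (List Char)), k ≤ s.length + 1 → s.length + 1 - k < fuel →
      pvAGo sub to_m s fuel (PySem.Chars.findFrom s sub (k : Int) none) acc
        = (List.range' k (s.length + 1 - k)).foldl (pvStep sub to_m s) acc := by
  intro fuel
  induction fuel with
  | zero => intro k acc _ h; omega
  | succ fuel ih =>
    intro k acc hk hfuel
    by_cases hk1 : k = s.length + 1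
    · subst hk1
      rw [show ((s.length + 1 : Nat) : Int) = (s.length : Int) + 1 by push_cast; ring, pvFindFrom_past]
      simp [pvAGo]
    · have hk' : k ≤ s.length := by omega
      by_cases hneg : PySem.Chars.findFrom s sub (k : Int) none = -1
      · rw [hneg]
        simp only [pvAGo]
        rw [if_pos trivial]
        refine (pvStep_skip sub to_m s _ acc ?_).symm
        intro i hi hpre
        have hmem := List.mem_range'_1.mp hi
        exact ((PySem.Chars.findFrom_natCast_eq_neg_one_iff s sub k hk').mp hneg)
          (pvPrefix_ge sub s k i hmem.1 hpre)
      · obtain ⟨hge, hpre, hmin⟩ := PySem.Chars.findFrom_natCast_spec s sub k hk' hneg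
        set r := PySem.Chars.findFrom s sub (k : Int) none with hr
        have hrle : r ≤ (s.length : Int) := by
          rw [hr, PySem.Chars.findFrom_natCast s sub k hk']
          have := PySem.Chars.find_le_length (s.drop k) sub
          rw [List.length_drop] at this
          split <;> omega
        have hr0 : 0 ≤ r := le_trans (by exact_mod_cast Nat.zero_le k) hge
        set j := r.toNat with hj
        have hrj : r = (j : Int) := by omega
        have hjk : k ≤ j := by omega
        have hjle : j ≤ s.length := by omega
        -- unfold one loop iteration of A
        simp only [pvAGo, if_neg hneg]
        have hslices :
            PySem.List.slice s (some 0) (some r) ++ to_m ++ PySem.List.slice s (some (r + (sub.length : Int))) none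
              = s.take j ++ to_m ++ s.drop (j + sub.length) := by
          rw [hrj, PySem.List.slice_zero_start, PySem.List.slice_to_natCast,
            show ((j : Int) + (sub.length : Int)) = ((j + sub.length : Nat) : Int) by push_cast; ring,
            PySem.List.slice_from_natCast]
        rw [hslices, show r + 1 = ((j + 1 : Nat) : Int) by omega]
        rw [ih (j + 1) _ (by omega) (by omega)]
        -- split the right-hand range at j
        have hsplit : List.range' k (s.length + 1 - k)
            = List.range' k (j - k) ++ j :: List.range' (j + 1) (s.length - j) := by
          rw [← List.range'_succ (s := j) (n := s.length - j) (step := 1)]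
          rw [show s.length + 1 - k = (j - k) + (s.length - j + 1) by omega,
            ← List.range'_append, show k + 1 * (j - k) = j by omega]
        rw [hsplit, List.foldl_append, pvStep_skip sub to_m s _ acc ?_, List.foldl_cons]
        · rw [pvStep, if_pos hpre, show s.length + 1 - (j + 1) = s.length - j by omega]
        · intro i hi hp
          have hmem := List.mem_range'_1.mp hi
          exact hmin i hmem.1 (by omega) hp

lemma pvA_eq (f t m : String) :
    apply_rule_options f t m
      = ((List.range (m.toList.length + 1)).foldl (pvStep f.toList t.toList m.toList) []).map String.ofList := by
  unfold apply_rule_options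
  rw [show PySem.Chars.find m.toList f.toList = PySem.Chars.findFrom m.toList f.toList ((0 : Nat) : Int) none by
      simp]
  rw [pvAGo_eq f.toList t.toList m.toList (m.toList.length + 2) 0 [] (by omega) (by omega)]
  rw [List.range_eq_range']
  simp

-- ===== B-side lemmas: the rolling hash tracks (exact hash of the window) mod 1000000007 =====

-- the exact (un-modded) polynomial hash, the mathematical object the rolling hash tracks mod p
def pvPhashE (l : List Char) : Int := l.foldl (fun a c => a * 131 + (c.toNat : Int)) 0

lemma pvMod (x : Int) : PySem.Int.mod x 1000000007 = x % 1000000007 :=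
  PySem.Int.mod_eq_emod_of_pos (by norm_num)

lemma pvModStep (a c : Int) :
    (a % 1000000007 * 131 + c) % 1000000007 = (a * 131 + c) % 1000000007 := by
  have h : Int.ModEq 1000000007 (a % 1000000007) a := Int.emod_emod_of_dvd a dvd_rfl
  exact (h.mul_right 131).add_right c

lemma pvFoldAux : ∀ (l : List Char) (a : Int),
    List.foldl (fun a c => a * 131 + (c.toNat : Int)) a l
      = a * 131 ^ l.length + List.foldl (fun a c => a * 131 + (c.toNat : Int)) 0 l := by
  intro l
  induction l with
  | nil => intro a; simp
  | cons c l ih =>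
    intro a
    simp only [List.foldl_cons, List.length_cons]
    rw [ih, ih (0 * 131 + (c.toNat : Int))]
    ring

lemma pvPhashE_cons (c : Char) (l : List Char) :
    pvPhashE (c :: l) = (c.toNat : Int) * 131 ^ l.length + pvPhashE l := by
  simp only [pvPhashE, List.foldl_cons]
  rw [pvFoldAux]
  ring

lemma pvPhashE_snoc (l : List Char) (c : Char) :
    pvPhashE (l ++ [c]) = pvPhashE l * 131 + (c.toNat : Int) := by
  show (l ++ [c]).foldl _ 0 = _
  rw [List.foldl_append]
  rfl

-- the modded hash is the exact hash mod p
lemma pvBPhashAux : ∀ (l : List Char) (a : Int),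
    List.foldl (fun a c => PySem.Int.mod (a * 131 + (c.toNat : Int)) 1000000007) (a % 1000000007) l
      = (List.foldl (fun a c => a * 131 + (c.toNat : Int)) a l) % 1000000007 := by
  intro l
  induction l with
  | nil => intro a; rfl
  | cons c l ih =>
    intro a
    simp only [List.foldl_cons]
    rw [show PySem.Int.mod (a % 1000000007 * 131 + (c.toNat : Int)) 1000000007
        = (a * 131 + (c.toNat : Int)) % 1000000007 by
      rw [pvMod]; exact pvModStep a (c.toNat : Int)]
    exact ih (a * 131 + (c.toNat : Int))

lemma pvBPhash_eq (l : List Char) : pvBPhash l = pvPhashE l % 1000000007 := by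
  have h := pvBPhashAux l 0
  rw [show ((0 : Int) % 1000000007) = 0 from rfl] at h
  exact h

-- exact rolling update: hash of the window at k+1 from the window at k
lemma pvRoll (s : List Char) (m k : Nat) (hk : k + m < s.length) :
    pvPhashE ((s.drop (k + 1)).take m)
      = pvPhashE ((s.drop k).take m) * 131
        - ((s.getD k ' ').toNat : Int) * 131 ^ m + ((s.getD (k + m) ' ').toNat : Int) := by
  cases m with
  | zero =>
    simp only [List.take_zero, pow_zero, Nat.add_zero]
    show (0 : Int) = 0 * 131 - ((s.getD k ' ').toNat : Int) * 1 + ((s.getD k ' ').toNat : Int)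
    ring
  | succ m' =>
    have hk1 : k < s.length := by omega
    have hkm : k + 1 + m' < s.length := by omega
    have e1 : (s.drop k).take (m' + 1) = s[k] :: (s.drop (k + 1)).take m' := by
      rw [List.drop_eq_getElem_cons hk1, List.take_succ_cons]
    have e2 : (s.drop (k + 1)).take (m' + 1) = (s.drop (k + 1)).take m' ++ [s[k + 1 + m']] := by
      rw [List.take_add_one, List.getElem?_drop, List.getElem?_eq_getElem hkm]
      rfl
    have e3 : ((s.drop (k + 1)).take m').length = m' := by
      rw [List.length_take, List.length_drop]
      omega
    rw [e1, e2, pvPhashE_cons, pvPhashE_snoc, e3,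
      List.getD_eq_getElem s ' ' hk1,
      show k + (m' + 1) = k + 1 + m' by omega,
      List.getD_eq_getElem s ' ' hkm]
    ring

-- modded rolling update, as B's loop performs it
lemma pvRollM (s : List Char) (m k : Nat) (h : Int) (hk : k + m < s.length)
    (hh : h = pvPhashE ((s.drop k).take m) % 1000000007) :
    PySem.Int.mod (h * 131 - ((s.getD k ' ').toNat : Int) * PySem.Int.powMod 131 m 1000000007
        + ((s.getD (k + m) ' ').toNat : Int)) 1000000007
      = pvPhashE ((s.drop (k + 1)).take m) % 1000000007 := by
  rw [pvMod, PySem.Int.powMod_eq_emod 131 m (by norm_num), hh, pvRoll s m k hk]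
  have h1 : Int.ModEq 1000000007 (pvPhashE ((s.drop k).take m) % 1000000007)
      (pvPhashE ((s.drop k).take m)) := Int.emod_emod_of_dvd _ dvd_rfl
  have h2 : Int.ModEq 1000000007 ((131 : Int) ^ m % 1000000007) ((131 : Int) ^ m) :=
    Int.emod_emod_of_dvd _ dvd_rfl
  exact ((h1.mul_right 131).sub (h2.mul_left _)).add_right _

-- B's main loop equals the uniform per-position fold pvStep
lemma pvBloop (sub to_m s : List Char) (hm : sub.length ≤ s.length) :
    ∀ (cnt k : Nat) (h : Int) (acc : PySem.Set (List Char)),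
      k + cnt = s.length - sub.length + 1 →
      (cnt ≠ 0 → h = pvPhashE ((s.drop k).take sub.length) % 1000000007) →
      (((List.range' k cnt).map (fun (j : Nat) => (j : Int))).foldl
          (pvBStep sub to_m s (pvBPhash sub) (PySem.Int.powMod 131 sub.length 1000000007)) (h, acc)).2
        = (List.range' k cnt).foldl (pvStep sub to_m s) acc := by
  intro cnt
  induction cnt with
  | zero => intro k h acc _ _; rfl
  | succ cnt ih =>
    intro k h acc hcnt hh
    have hhk := hh (Nat.succ_ne_zero cnt)
    have hkle : k ≤ s.length - sub.length := by omega
    rw [List.range'_succ, List.map_cons, List.foldl_cons, List.foldl_cons]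
    have hslice : PySem.List.slice s (some (k : Int)) (some ((k : Int) + (sub.length : Int)))
        = (s.drop k).take sub.length := PySem.List.slice_natCast_add s k sub.length
    have hcond : (h = pvBPhash sub ∧
        PySem.List.slice s (some (k : Int)) (some ((k : Int) + (sub.length : Int))) = sub)
        ↔ sub <+: s.drop k := by
      rw [hslice]
      constructor
      · rintro ⟨_, he⟩
        exact List.prefix_iff_eq_take.mpr he.symm
      · intro hp
        have he := (List.prefix_iff_eq_take.mp hp).symm
        refine ⟨?_, he⟩
        rw [hhk, he, pvBPhash_eq]
    have hstep : (pvBStep sub to_m s (pvBPhash sub) (PySem.Int.powMod 131 sub.length 1000000007)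
          (h, acc) (k : Int)).2
        = pvStep sub to_m s acc k := by
      simp only [pvBStep, pvStep]
      by_cases hp : sub <+: s.drop k
      · rw [if_pos (hcond.mpr hp), if_pos hp,
          PySem.List.slice_to_natCast,
          show ((k : Int) + (sub.length : Int)) = ((k + sub.length : Nat) : Int) by omega,
          PySem.List.slice_from_natCast]
      · rw [if_neg (fun hc => hp (hcond.mp hc)), if_neg hp]
    have hfst : (pvBStep sub to_m s (pvBPhash sub) (PySem.Int.powMod 131 sub.length 1000000007)
          (h, acc) (k : Int)).1
        = if (k : Int) + (sub.length : Int) < (s.length : Int)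
          then PySem.Int.mod (h * 131 - ((s.getD k ' ').toNat : Int)
                  * PySem.Int.powMod 131 sub.length 1000000007
                + ((s.getD (k + sub.length) ' ').toNat : Int)) 1000000007
          else h := by
      simp only [pvBStep]
      split
      · rw [PySem.List.pyGetD_natCast,
          show ((k : Int) + (sub.length : Int)) = ((k + sub.length : Nat) : Int) by omega,
          PySem.List.pyGetD_natCast]
      · rfl
    rw [show pvBStep sub to_m s (pvBPhash sub) (PySem.Int.powMod 131 sub.length 1000000007)
          (h, acc) (k : Int)
        = ((pvBStep sub to_m s (pvBPhash sub) (PySem.Int.powMod 131 sub.length 1000000007)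
            (h, acc) (k : Int)).1,
           (pvBStep sub to_m s (pvBPhash sub) (PySem.Int.powMod 131 sub.length 1000000007)
            (h, acc) (k : Int)).2) from rfl,
      hstep, hfst]
    rw [ih (k + 1) _ (pvStep sub to_m s acc k) (by omega) ?_]
    intro hc0
    have hlt : k + sub.length < s.length := by omega
    rw [if_pos (by omega : (k : Int) + (sub.length : Int) < (s.length : Int))]
    exact pvRollM s sub.length k h hlt hhk

lemma pvB_eq (f t m : String) :
    apply_rule_options_alt f t m
      = ((List.range (m.toList.length + 1)).foldl (pvStep f.toList t.toList m.toList) []).map String.ofList := by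
  unfold apply_rule_options_alt
  by_cases hgt : f.toList.length > m.toList.length
  · rw [if_pos hgt, List.range_eq_range',
      pvStep_skip f.toList t.toList m.toList _ [] ?_]
    · rfl
    · intro i _ hp
      have hle := hp.length_le
      rw [List.length_drop] at hle
      omega
  · rw [if_neg hgt]
    have hm : f.toList.length ≤ m.toList.length := Nat.le_of_not_lt hgt
    rw [show ((m.toList.length : Int) - (f.toList.length : Int) + 1)
          = ((m.toList.length - f.toList.length + 1 : Nat) : Int) by omega,
      PySem.List.pyRange_zero_nat, PySem.List.slice_to_natCast]
    rw [List.range_eq_range', List.range_eq_range']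
    rw [pvBloop f.toList t.toList m.toList hm (m.toList.length - f.toList.length + 1) 0
      (pvBPhash (m.toList.take f.toList.length)) [] (by omega)
      (fun _ => by rw [List.drop_zero, pvBPhash_eq])]
    have hsplit : List.range' 0 (m.toList.length + 1)
        = List.range' 0 (m.toList.length - f.toList.length + 1)
          ++ List.range' (m.toList.length - f.toList.length + 1) f.toList.length := by
      rw [show m.toList.length + 1
          = (m.toList.length - f.toList.length + 1) + f.toList.length by omega,
        ← List.range'_append, Nat.one_mul, Nat.zero_add]
    have hskip : ∀ acc : PySem.Set (List Char),
        (List.range' (m.toList.length - f.toList.length + 1) f.toList.length).foldl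
          (pvStep f.toList t.toList m.toList) acc = acc := by
      intro acc
      refine pvStep_skip _ _ _ _ _ ?_
      intro i hi hp
      have hmem := List.mem_range'_1.mp hi
      have hle := hp.length_le
      rw [List.length_drop] at hle
      omega
    rw [hsplit, List.foldl_append, hskip]

-- ===== VERDICT (by name: the statement is the Claim_ definition above) =====
theorem apply_rule_options_spec : Claim_equal_apply_rule_options := by
  intro f t m _
  unfold Spec_apply_rule_options
  rw [pvA_eq, pvB_eq]
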